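-- pv_equiv track=rewrite | github.com/cbn-alpin/gefiproj-api | src/api/exports/utils.py | create_real_data_export
-- ===== SOURCE A (Python) =====
-- def in_year_range(current_year: int, range_year: []):
--     for year in range_year:
--         if current_year == year:
--             return 1
--
--     return 0
--
-- def get_data_from_year(year: int, datas: []):
--     for data in datas:
--         if data[0] != 0 and year == data[0]:
--             return data
--
-- def insert_empty_data_from_year(year: int):
--     return [
--         year,
--         0,  # montant_recette
--         0,  # affectation_avant
--         0,  # affectation_a
--         0,  # affectation_a2
--         0,  # affectation_a3
--         0,  # affectation_a4
--         0,  # affectation_a5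
--         0,  # affectation_a6
--         0  # affectation_apres
--     ]
--
-- def create_real_data_export(current_year_range: [], year_ref: int, last_year: int, export_data: []):
--     new_export_data = [insert_empty_data_from_year(0)]
--
--     for x in range(year_ref, last_year + 1, 1):
--         if in_year_range(x, current_year_range) == 0:
--             new_export_data.append(insert_empty_data_from_year(x))
--         else:
--             new_export_data.append(get_data_from_year(x, export_data))
--
--     return new_export_data
-- ===== SOURCE B (Python) =====
-- def insert_empty_data_from_year(year: int):
--     return [year, 0, 0, 0, 0, 0, 0, 0, 0, 0]
--
-- def create_real_data_export(current_year_range: [], year_ref: int, last_year: int, export_data: []):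
--     years = set(current_year_range)
--     # stage 1: allocate the whole output; slot 0 is the year-0 empty row,
--     # an empty row for each year outside the range set, a None placeholder inside it
--     result = [insert_empty_data_from_year(0)]
--     for x in range(year_ref, last_year + 1):
--         result.append(None if x in years else insert_empty_data_from_year(x))
--     # stage 2: one scatter pass over export_data, writing each datum into its
--     # computed slot; a slot already filled keeps its first datum (first-match wins)
--     for data in export_data:
--         y = data[0]
--         if y != 0 and year_ref <= y <= last_year and y in years:
--             i = y - year_ref + 1
--             if result[i] is None:
--                 result[i] = data
--     return result
-- ===== Notes on version B (the rewrite author's own statement) =====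
-- stated objective: alternative
-- what changed: B reverses the traversal: it first allocates the whole output (empty row per year outside the range set, None placeholder inside it), then makes ONE scatter pass over export_data writing each datum into its computed slot index, first write wins, instead of A's per-year linear rescans of export_data.
-- outside the precondition, e.g. on create_real_data_export([], 0, -1, [[]]): A returns [[0, 0, 0, 0, 0, 0, 0, 0, 0, 0]], B raises IndexError
import Mathlib
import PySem

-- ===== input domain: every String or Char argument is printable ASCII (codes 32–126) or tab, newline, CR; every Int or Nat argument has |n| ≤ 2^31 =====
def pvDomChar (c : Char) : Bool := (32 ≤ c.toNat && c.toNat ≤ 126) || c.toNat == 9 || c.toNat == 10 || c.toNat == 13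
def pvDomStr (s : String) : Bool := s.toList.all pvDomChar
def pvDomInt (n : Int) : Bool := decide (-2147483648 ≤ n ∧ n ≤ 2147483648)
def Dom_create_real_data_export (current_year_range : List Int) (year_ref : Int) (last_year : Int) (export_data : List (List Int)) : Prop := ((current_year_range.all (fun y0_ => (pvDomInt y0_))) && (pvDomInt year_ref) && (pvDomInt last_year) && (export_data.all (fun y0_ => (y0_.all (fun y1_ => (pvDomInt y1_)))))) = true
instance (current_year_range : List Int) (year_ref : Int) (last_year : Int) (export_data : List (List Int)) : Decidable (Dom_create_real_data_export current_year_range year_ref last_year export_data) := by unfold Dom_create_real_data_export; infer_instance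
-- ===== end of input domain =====

-- B allocates the full output once (empty rows / None placeholders), then scatters export_data into computed slot indices in one pass, first write wins (alternative decomposition, reversed traversal); return-value equivalence only.


-- ===== PORT A =====
def pv_in_year_range (current_year : Int) (range_year : List Int) : Int :=
  match range_year with
  | [] => 0
  | year :: rest => if current_year = year then 1 else pv_in_year_range current_year rest

def pv_get_data_from_year (year : Int) (datas : List (List Int)) : Option (List Int) :=
  match datas with
  | [] => none
  | data :: rest =>
    match PySem.List.pyGet? data 0 with
    | none => none  -- Python raises IndexError here; excluded by Pre_
    | some d0 => if d0 ≠ 0 ∧ year = d0 then some data else pv_get_data_from_year year rest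

def pv_insert_empty_data_from_year (year : Int) : List Int :=
  [year, 0, 0, 0, 0, 0, 0, 0, 0, 0]

def create_real_data_export (current_year_range : List Int) (year_ref : Int) (last_year : Int) (export_data : List (List Int)) : List (Option (List Int)) :=
  (PySem.List.pyRange year_ref (last_year + 1) 1).foldl
    (fun acc x =>
      acc ++ [if pv_in_year_range x current_year_range = 0
              then some (pv_insert_empty_data_from_year x)
              else pv_get_data_from_year x export_data])
    [some (pv_insert_empty_data_from_year 0)]

-- ===== PORT B =====
def pvB_insert_empty_data_from_year (year : Int) : List Int :=
  [year, 0, 0, 0, 0, 0, 0, 0, 0, 0]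

-- one scatter step: write `data` into its computed slot if that slot is still None
def pvB_step (year_ref last_year : Int) (years : PySem.Set Int)
    (out : List (Option (List Int))) (data : List Int) : List (Option (List Int)) :=
  match PySem.List.pyGet? data 0 with
  | none => out  -- Python B raises IndexError (data[0]) here; excluded by Pre_
  | some y =>
    if y ≠ 0 ∧ year_ref ≤ y ∧ y ≤ last_year ∧ PySem.Set.contains years y then
      let i : Nat := (y - year_ref + 1).toNat
      match out[i]? with
      | some none => out.set i (some data)
      | _ => out
    else out

def create_real_data_export_alt (current_year_range : List Int) (year_ref : Int) (last_year : Int) (export_data : List (List Int)) : List (Option (List Int)) :=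
  let years : PySem.Set Int := PySem.Set.ofList current_year_range
  let init : List (Option (List Int)) :=
    some (pvB_insert_empty_data_from_year 0) ::
      (PySem.List.pyRange year_ref (last_year + 1) 1).map
        (fun x => if PySem.Set.contains years x then none
                  else some (pvB_insert_empty_data_from_year x))
  export_data.foldl (pvB_step year_ref last_year years) init

-- ===== PRECONDITION & SPEC =====
-- Pre_ excludes export_data containing an empty row: on such inputs Python A raises
-- IndexError (data[0]) whenever the row is reached by a scan, and B raises on its
-- single pass; where a scan never reaches it, A still returns (see claim cites).
def Pre_create_real_data_export (_current_year_range : List Int) (_year_ref : Int) (_last_year : Int) (export_data : List (List Int)) : Prop :=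
  ∀ d ∈ export_data, d ≠ []
instance (current_year_range : List Int) (year_ref : Int) (last_year : Int) (export_data : List (List Int)) : Decidable (Pre_create_real_data_export current_year_range year_ref last_year export_data) := by unfold Pre_create_real_data_export; infer_instance

def pvWitness_create_real_data_export : List Int × Int × Int × List (List Int) :=
  ([1, 3], 0, 3, [[1, 7, 0], [3, 2]])

def Spec_create_real_data_export (current_year_range : List Int) (year_ref : Int) (last_year : Int) (export_data : List (List Int)) (out : List (Option (List Int))) : Prop := out = create_real_data_export_alt current_year_range year_ref last_year export_data
instance (current_year_range : List Int) (year_ref : Int) (last_year : Int) (export_data : List (List Int)) (out : List (Option (List Int))) : Decidable (Spec_create_real_data_export current_year_range year_ref last_year export_data out) := by unfold Spec_create_real_data_export; infer_instance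

-- ===== CLAIM (what is proved, stated in full; the proofs are below) =====
def Claim_equal_create_real_data_export : Prop := ∀ (current_year_range : List Int) (year_ref : Int) (last_year : Int) (export_data : List (List Int)), Dom_create_real_data_export current_year_range year_ref last_year export_data → Pre_create_real_data_export current_year_range year_ref last_year export_data → Spec_create_real_data_export current_year_range year_ref last_year export_data (create_real_data_export current_year_range year_ref last_year export_data)

-- ===== LEMMAS AND PROOFS =====

/-- A's membership scan returns 0 exactly when B's set does not contain the year. -/
theorem pv_in_year_range_eq (x : Int) (l : List Int) :
    pv_in_year_range x l = if PySem.Set.contains (PySem.Set.ofList l) x then 1 else 0 := by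
  induction l with
  | nil => simp [pv_in_year_range, PySem.Set.contains]
  | cons y ys ih =>
    simp only [pv_in_year_range]
    by_cases h : x = y
    · simp [h, PySem.Set.contains, PySem.Set.mem_ofList]
    · rw [if_neg h, ih]
      simp [PySem.Set.contains, PySem.Set.mem_ofList, h, eq_comm]

/-- The scatter fold preserves the length of the output list. -/
theorem pvB_foldl_length (yr ly : Int) (ys : PySem.Set Int) :
    ∀ (ed : List (List Int)) (out : List (Option (List Int))),
      (ed.foldl (pvB_step yr ly ys) out).length = out.length := by
  intro ed
  induction ed with
  | nil => intro out; rfl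
  | cons d rest ih =>
    intro out
    simp only [List.foldl_cons]
    rw [ih]
    unfold pvB_step
    cases PySem.List.pyGet? d 0 with
    | none => rfl
    | some y =>
      simp only
      split_ifs with h
      · rcases hslot : out[(y - yr + 1).toNat]? with _ | v
        · simp
        · cases v <;> simp
      · rfl

/-- Stability: a slot not holding the None placeholder is never rewritten. -/
theorem pvB_foldl_stable (yr ly : Int) (ys : PySem.Set Int) :
    ∀ (ed : List (List Int)) (out : List (Option (List Int))) (k : Nat),
      out[k]? ≠ some none →
      (ed.foldl (pvB_step yr ly ys) out)[k]? = out[k]? := by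
  intro ed
  induction ed with
  | nil => intro out k _; rfl
  | cons d rest ih =>
    intro out k hk
    simp only [List.foldl_cons]
    have hstep : (pvB_step yr ly ys out d)[k]? = out[k]? := by
      unfold pvB_step
      cases PySem.List.pyGet? d 0 with
      | none => rfl
      | some y =>
        simp only
        split_ifs with h
        · rcases hslot : out[(y - yr + 1).toNat]? with _ | v
          · simp
          · cases v with
            | none =>
              have hne : (y - yr + 1).toNat ≠ k := by
                intro heq; rw [heq] at hslot; exact hk hslot
              rw [List.getElem?_set_ne hne]
            | some v => simp
        · rfl
    rw [ih _ k (by rw [hstep]; exact hk), hstep]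

/-- Scatter characterisation: a None-placeholder slot k (year x = yr + k - 1 in
    the range set, x ≤ ly) ends up holding exactly A's first-match scan result. -/
theorem pvB_foldl_scatter (yr ly : Int) (ys : PySem.Set Int) :
    ∀ (ed : List (List Int)) (out : List (Option (List Int))) (k : Nat),
      (∀ d ∈ ed, d ≠ []) →
      1 ≤ k →
      out[k]? = some none →
      PySem.Set.contains ys (yr + k - 1) = true →
      yr + (k : Int) - 1 ≤ ly →
      (ed.foldl (pvB_step yr ly ys) out)[k]? =
        some (pv_get_data_from_year (yr + k - 1) ed) := by
  intro ed
  induction ed with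
  | nil =>
    intro out k _ _ hk _ _
    simpa [pv_get_data_from_year] using hk
  | cons d rest ih =>
    intro out k hne hk1 hk hmem hle
    obtain ⟨a, t, rfl⟩ : ∃ a t, d = a :: t := by
      cases d with
      | nil => exact absurd rfl (hne [] (by simp))
      | cons a t => exact ⟨a, t, rfl⟩
    have hrest : ∀ d ∈ rest, d ≠ [] := fun d hd => hne d (by simp [hd])
    simp only [List.foldl_cons]
    have hx1 : yr ≤ yr + (k : Int) - 1 := by omega
    by_cases hax : a = yr + (k : Int) - 1
    · -- the datum targets slot k
      have ha0 : a ≠ 0 ∨ a = 0 := em' _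
      by_cases haz : a = 0
      · -- year x = 0: neither A's scan nor B's write accepts it
        have hstep : pvB_step yr ly ys out (a :: t) = out := by
          unfold pvB_step
          simp [haz]
        rw [hstep, ih out k hrest hk1 hk hmem hle]
        simp [pv_get_data_from_year, haz]
      · -- write happens at slot k; afterwards the slot is stable
        have hidx : (a - yr + 1).toNat = k := by omega
        have hstep : pvB_step yr ly ys out (a :: t) = out.set k (some (a :: t)) := by
          unfold pvB_step
          simp only [PySem.List.pyGet?_zero_cons, hidx]
          rw [if_pos ⟨haz, by omega, by omega, by rw [hax]; exact hmem⟩, hk]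
        rw [hstep]
        have hklen : k < out.length := by
          by_contra hge
          rw [List.getElem?_eq_none (by omega)] at hk
          simp at hk
        have hset : (out.set k (some (a :: t)))[k]? = some (some (a :: t)) := by
          rw [List.getElem?_set_self (by simpa using hklen)]
        rw [pvB_foldl_stable yr ly ys rest _ k (by rw [hset]; simp), hset]
        simp [pv_get_data_from_year, haz, hax.symm]
    · -- the datum does not target slot k: the slot keeps its placeholder
      have hscan : pv_get_data_from_year (yr + (k : Int) - 1) ((a :: t) :: rest) =
          pv_get_data_from_year (yr + (k : Int) - 1) rest := by
        simp only [pv_get_data_from_year, PySem.List.pyGet?_zero_cons]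
        rw [if_neg]
        rintro ⟨-, h⟩
        exact hax h.symm
      rw [hscan]
      have hstepk : (pvB_step yr ly ys out (a :: t))[k]? = some none := by
        unfold pvB_step
        simp only [PySem.List.pyGet?_zero_cons]
        split_ifs with h
        · rcases hslot : out[(a - yr + 1).toNat]? with _ | v
          · exact hk
          · cases v with
            | none =>
              have hne2 : (a - yr + 1).toNat ≠ k := by
                intro heq
                exact hax (by omega)
              rw [List.getElem?_set_ne hne2]; exact hk
            | some v => exact hk
        · exact hk
      exact ih _ k hrest hk1 hstepk hmem hle

-- ===== VERDICT (by name: the statement is the Claim_ definition above) =====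
theorem create_real_data_export_spec : Claim_equal_create_real_data_export := by
  intro cyr yr ly ed _ hpre
  unfold Spec_create_real_data_export create_real_data_export create_real_data_export_alt
  rw [PySem.List.foldl_append_singleton_eq_map]
  set ys := PySem.Set.ofList cyr with hys
  set rng := PySem.List.pyRange yr (ly + 1) 1 with hrng
  set init : List (Option (List Int)) :=
    some (pvB_insert_empty_data_from_year 0) ::
      rng.map (fun x => if PySem.Set.contains ys x then none
                        else some (pvB_insert_empty_data_from_year x)) with hinit
  have hlen : (ed.foldl (pvB_step yr ly ys) init).length = 1 + rng.length := by
    rw [pvB_foldl_length]; simp [hinit]; omega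
  apply List.ext_getElem?
  intro k
  by_cases hklt : k < 1 + rng.length
  · cases k with
    | zero =>
      have h0 : init[0]? = some (some (pvB_insert_empty_data_from_year 0)) := by
        simp [hinit]
      rw [pvB_foldl_stable yr ly ys ed init 0 (by rw [h0]; simp), h0]
      simp [pv_insert_empty_data_from_year, pvB_insert_empty_data_from_year]
    | succ j =>
      have hj : j < rng.length := by omega
      have hjlen : j < (ly + 1 - yr).toNat := by
        simpa [hrng, PySem.List.length_pyRange_one] using hj
      have hx : rng[j]? = some (yr + (j : Int)) := by
        rw [hrng, PySem.List.getElem?_pyRange_one, if_pos hjlen]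
      have hA : ([some (pv_insert_empty_data_from_year 0)] ++
          rng.map (fun x => if pv_in_year_range x cyr = 0
              then some (pv_insert_empty_data_from_year x)
              else pv_get_data_from_year x ed))[j + 1]? =
          some (if pv_in_year_range (yr + j) cyr = 0
              then some (pv_insert_empty_data_from_year (yr + j))
              else pv_get_data_from_year (yr + j) ed) := by
        rw [List.getElem?_append_right (by simp)]
        simp [List.getElem?_map, hx]
      have hinitj : init[j + 1]? =
          some (if PySem.Set.contains ys (yr + j) then none
                else some (pvB_insert_empty_data_from_year (yr + j))) := by
        simp [hinit, List.getElem?_map, hx]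
      rw [hA]
      have hxle : yr + (j : Int) ≤ ly := by omega
      by_cases hc : PySem.Set.contains ys (yr + j) = true
      · have hk : init[j + 1]? = some none := by rw [hinitj, if_pos hc]
        have heq : yr + ((j + 1 : Nat) : Int) - 1 = yr + j := by push_cast; ring
        rw [pvB_foldl_scatter yr ly ys ed init (j + 1) hpre (by omega) hk
            (by rw [heq]; exact hc) (by omega)]
        have hm : yr + (j : Int) ∈ ys := by simpa using hc
        rw [pv_in_year_range_eq, ← hys, heq]
        simp [hm]
      · have hm : yr + (j : Int) ∉ ys := by simpa using hc
        have hk : init[j + 1]? =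
            some (some (pvB_insert_empty_data_from_year (yr + j))) := by
          rw [hinitj, if_neg (by simpa using hm)]
        rw [pvB_foldl_stable yr ly ys ed init (j + 1) (by rw [hk]; simp), hk]
        rw [pv_in_year_range_eq, ← hys]
        simp [hm, pv_insert_empty_data_from_year, pvB_insert_empty_data_from_year]
  · have h1 : (ed.foldl (pvB_step yr ly ys) init).length ≤ k := by omega
    rw [List.getElem?_eq_none h1, List.getElem?_eq_none (by simp; omega)]
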